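-- pv_equiv track=rewrite | github.com/HyeJiRoh/Algorithm | 프로그래머스/unrated/181834. l로 만들기/l로 만들기.py | solution
-- ===== SOURCE A (Python) =====
-- def solution(myString):
--     answer = ''
--
--     for word in myString:
--         if ord(word) < ord('l'):
--             answer += 'l'
--         else:
--             answer += word
--
--     return answer
-- ===== SOURCE B (Python) =====
-- def solution(myString):
--     table = {c: 'l' for c in range(ord('l'))}
--     return myString.translate(table)
-- ===== Notes on version B (the rewrite author's own statement) =====
-- stated objective: idiomatic
-- what changed: Replaces the per-character branch-and-concatenate loop with a translation table built once (all code points below 'l' mapped to 'l') applied by str.translate in one pass.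
import Mathlib
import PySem

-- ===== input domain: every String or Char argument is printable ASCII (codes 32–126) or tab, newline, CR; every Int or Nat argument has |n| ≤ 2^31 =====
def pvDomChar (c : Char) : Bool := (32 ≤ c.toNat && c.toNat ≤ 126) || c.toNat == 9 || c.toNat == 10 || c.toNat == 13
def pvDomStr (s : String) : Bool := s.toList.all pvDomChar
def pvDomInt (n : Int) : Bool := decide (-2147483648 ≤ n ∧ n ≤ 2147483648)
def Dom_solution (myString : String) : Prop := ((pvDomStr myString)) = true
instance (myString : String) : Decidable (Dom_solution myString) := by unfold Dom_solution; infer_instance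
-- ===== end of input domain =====

-- B builds a translation table once (every code point below 'l' maps to 'l') and applies it
-- with str.translate in one pass, instead of A's per-character branch with string concatenation.


-- ===== PORT A =====
-- answer accumulated as a list of chars (Python string concatenation; String.mk at return),
-- branch order as in A: ord(word) < ord('l') → append 'l', else append word.
def solution (myString : String) : String :=
  String.mk (myString.toList.foldl
    (fun answer word =>
      if (word.toNat : Int) < 108 then answer ++ ['l'] else answer ++ [word])
    [])

-- ===== PORT B =====
-- table = {c: 'l' for c in range(ord('l'))}
def solutionTable : PySem.Dict Int Char :=
  (PySem.List.pyRange 0 108 1).foldl (fun d c => d.insert c 'l') PySem.Dict.empty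

-- myString.translate(table): each char is looked up by its code point; unmapped chars are kept.
def solution_alt (myString : String) : String :=
  String.mk (myString.toList.map
    (fun ch => (solutionTable.get? (ch.toNat : Int)).getD ch))

-- ===== PRECONDITION & SPEC =====
def Spec_solution (myString : String) (out : String) : Prop := out = solution_alt myString
instance (myString : String) (out : String) : Decidable (Spec_solution myString out) := by unfold Spec_solution; infer_instance

-- ===== CLAIM (what is proved, stated in full; the proofs are below) =====
def Claim_equal_solution : Prop := ∀ (myString : String), Dom_solution myString → Spec_solution myString (solution myString)

-- ===== LEMMAS AND PROOFS =====

-- lookup in the fold-built range table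
theorem get?_rangeTable (n : Nat) (k : Int) :
    ((List.range n).foldl
        (fun d c => d.insert (c : Int) 'l') PySem.Dict.empty).get? k
      = if 0 ≤ k ∧ k < (n : Int) then some 'l' else none := by
  induction n with
  | zero =>
      rw [List.range_zero, List.foldl_nil, PySem.Dict.get?_empty]
      rw [if_neg (by omega)]
  | succ n ih =>
      rw [List.range_succ, List.foldl_append, List.foldl_cons, List.foldl_nil]
      rw [PySem.Dict.get?_insert]
      rcases eq_or_ne k (n : Int) with h | h
      · rw [if_pos h, if_pos ⟨by omega, by omega⟩]
      · rw [if_neg h, ih]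
        by_cases hk : 0 ≤ k ∧ k < (n : Int)
        · rw [if_pos hk, if_pos ⟨hk.1, by push_cast; omega⟩]
        · rw [if_neg hk, if_neg (by push_cast at *; omega)]

theorem get?_solutionTable (k : Int) :
    solutionTable.get? k = if 0 ≤ k ∧ k < 108 then some 'l' else none := by
  unfold solutionTable
  rw [PySem.List.pyRange_one, List.foldl_map]
  have : ((108 : Int) - 0).toNat = 108 := by decide
  rw [this]
  simp only [zero_add]
  rw [get?_rangeTable]
  norm_num

theorem foldl_eq_map (l : List Char) (acc : List Char) :
    l.foldl (fun answer word =>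
        if (word.toNat : Int) < 108 then answer ++ ['l'] else answer ++ [word]) acc
      = acc ++ l.map (fun word => if (word.toNat : Int) < 108 then 'l' else word) := by
  induction l generalizing acc with
  | nil => simp
  | cons c t ih =>
      simp only [List.foldl_cons, List.map_cons]
      by_cases h : (c.toNat : Int) < 108
      · rw [if_pos h, ih, if_pos h]; simp
      · rw [if_neg h, ih, if_neg h]; simp

-- ===== VERDICT (by name: the statement is the Claim_ definition above) =====
set_option maxRecDepth 4096 in
theorem solution_spec : Claim_equal_solution := by
  intro s _
  unfold Spec_solution solution solution_alt
  rw [foldl_eq_map, List.nil_append]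
  congr 1
  apply List.map_congr_left
  intro c _
  rw [get?_solutionTable]
  by_cases h : (c.toNat : Int) < 108
  · rw [if_pos h, if_pos ⟨Int.natCast_nonneg _, h⟩, Option.getD_some]
  · rw [if_neg h, if_neg (by omega), Option.getD_none]
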